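-- pv_equiv track=rewrite | github.com/thehalleyyoung/litmus-inf | litmus_inf/expanded_benchmark_v2.py | _classify_failure_root_cause
-- ===== SOURCE A (Python) =====
-- def _classify_failure_root_cause(failure):
--     """Classify the root cause of a benchmark failure."""
--     expected = failure.get('expected', '')
--     predicted = failure.get('predicted', '')
--
--     if predicted == 'ERROR':
--         return 'parse_error'
--     if predicted == 'none':
--         return 'unrecognized_pattern'
--
--     # Check for related pattern confusion
--     related_groups = {
--         'mp': {'mp', 'mp_fence', 'mp_addr', 'mp_data', 'mp_ctrl',
--                'mp_fence_ww', 'mp_fence_wr', 'wrc', 'isa2'},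
--         'sb': {'sb', 'sb_fence', 'lb', 'dekker'},
--         'iriw': {'iriw', 'iriw_fence'},
--         'gpu_mp_wg': {'gpu_mp_wg', 'gpu_mp_dev', 'gpu_mp_scope', 'mp'},
--         'gpu_sb_wg': {'gpu_sb_wg', 'gpu_sb_dev', 'sb'},
--     }
--
--     for group_name, group_pats in related_groups.items():
--         if expected in group_pats and predicted in group_pats:
--             return 'related_pattern_confusion'
--
--     return 'semantic_mismatch'
-- ===== SOURCE B (Python) =====
-- # Idiomatic alternative: a precomputed inverted index (pattern -> set of related-group
-- # ids); two patterns are confusable iff their group-id sets intersect.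
--
-- _PATTERN_GROUPS = {
--     'mp': frozenset({0, 3}),
--     'mp_fence': frozenset({0}),
--     'mp_addr': frozenset({0}),
--     'mp_data': frozenset({0}),
--     'mp_ctrl': frozenset({0}),
--     'mp_fence_ww': frozenset({0}),
--     'mp_fence_wr': frozenset({0}),
--     'wrc': frozenset({0}),
--     'isa2': frozenset({0}),
--     'sb': frozenset({1, 4}),
--     'sb_fence': frozenset({1}),
--     'lb': frozenset({1}),
--     'dekker': frozenset({1}),
--     'iriw': frozenset({2}),
--     'iriw_fence': frozenset({2}),
--     'gpu_mp_wg': frozenset({3}),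
--     'gpu_mp_dev': frozenset({3}),
--     'gpu_mp_scope': frozenset({3}),
--     'gpu_sb_wg': frozenset({4}),
--     'gpu_sb_dev': frozenset({4}),
-- }
--
-- _EMPTY = frozenset()
--
--
-- def _classify_failure_root_cause(failure):
--     """Classify the root cause of a benchmark failure."""
--     expected = failure.get('expected', '')
--     predicted = failure.get('predicted', '')
--
--     if predicted == 'ERROR':
--         return 'parse_error'
--     if predicted == 'none':
--         return 'unrecognized_pattern'
--
--     if _PATTERN_GROUPS.get(expected, _EMPTY) & _PATTERN_GROUPS.get(predicted, _EMPTY):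
--         return 'related_pattern_confusion'
--     return 'semantic_mismatch'
-- ===== Notes on version B (the rewrite author's own statement) =====
-- stated objective: idiomatic
-- what changed: Replaces the per-call loop over group sets (two membership tests per group) with a precomputed inverted index mapping each pattern to its set of group ids, so classification is two dict lookups and one set-intersection test.
import Mathlib
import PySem

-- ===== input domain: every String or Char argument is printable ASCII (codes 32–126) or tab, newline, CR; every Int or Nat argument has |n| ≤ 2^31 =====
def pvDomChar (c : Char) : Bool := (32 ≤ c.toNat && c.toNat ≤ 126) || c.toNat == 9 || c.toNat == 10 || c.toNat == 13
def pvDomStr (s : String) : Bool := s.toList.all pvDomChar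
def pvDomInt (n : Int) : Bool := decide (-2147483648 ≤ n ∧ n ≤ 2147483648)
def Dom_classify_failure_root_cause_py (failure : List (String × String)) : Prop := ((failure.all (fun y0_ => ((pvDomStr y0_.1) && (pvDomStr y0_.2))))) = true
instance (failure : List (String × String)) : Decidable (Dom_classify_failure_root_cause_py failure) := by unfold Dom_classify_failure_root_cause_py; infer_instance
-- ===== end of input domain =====

-- B replaces A's per-call loop over group sets by a precomputed inverted index
-- (pattern -> set of group ids) and one set-intersection test (objective: idiomatic).


-- ===== PORT A =====
-- the related_groups dict of A: group names mapped to Python set literals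
def aRelatedGroups : List (String × PySem.Set String) :=
  [("mp", PySem.Set.ofList ["mp", "mp_fence", "mp_addr", "mp_data", "mp_ctrl",
                            "mp_fence_ww", "mp_fence_wr", "wrc", "isa2"]),
   ("sb", PySem.Set.ofList ["sb", "sb_fence", "lb", "dekker"]),
   ("iriw", PySem.Set.ofList ["iriw", "iriw_fence"]),
   ("gpu_mp_wg", PySem.Set.ofList ["gpu_mp_wg", "gpu_mp_dev", "gpu_mp_scope", "mp"]),
   ("gpu_sb_wg", PySem.Set.ofList ["gpu_sb_wg", "gpu_sb_dev", "sb"])]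

-- A's 'for group_name, group_pats in related_groups.items(): if … return …' loop
def aGroupLoop (expected predicted : String) : List (String × PySem.Set String) → String
  | [] => "semantic_mismatch"
  | (_, group_pats) :: rest =>
    if PySem.Set.contains group_pats expected && PySem.Set.contains group_pats predicted then
      "related_pattern_confusion"
    else aGroupLoop expected predicted rest

def classify_failure_root_cause_py (failure : List (String × String)) : String :=
  let d := PySem.Dict.ofList failure
  let expected := d.getD "expected" ""
  let predicted := d.getD "predicted" ""
  if predicted = "ERROR" then "parse_error"
  else if predicted = "none" then "unrecognized_pattern"
  else aGroupLoop expected predicted aRelatedGroups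

-- ===== PORT B =====
-- Source B's _PATTERN_GROUPS literal: pattern -> frozenset of related-group ids
def bPatternGroups : PySem.Dict String (PySem.Set Nat) :=
  PySem.Dict.ofList
  [("mp", PySem.Set.ofList [0, 3]),
   ("mp_fence", PySem.Set.ofList [0]),
   ("mp_addr", PySem.Set.ofList [0]),
   ("mp_data", PySem.Set.ofList [0]),
   ("mp_ctrl", PySem.Set.ofList [0]),
   ("mp_fence_ww", PySem.Set.ofList [0]),
   ("mp_fence_wr", PySem.Set.ofList [0]),
   ("wrc", PySem.Set.ofList [0]),
   ("isa2", PySem.Set.ofList [0]),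
   ("sb", PySem.Set.ofList [1, 4]),
   ("sb_fence", PySem.Set.ofList [1]),
   ("lb", PySem.Set.ofList [1]),
   ("dekker", PySem.Set.ofList [1]),
   ("iriw", PySem.Set.ofList [2]),
   ("iriw_fence", PySem.Set.ofList [2]),
   ("gpu_mp_wg", PySem.Set.ofList [3]),
   ("gpu_mp_dev", PySem.Set.ofList [3]),
   ("gpu_mp_scope", PySem.Set.ofList [3]),
   ("gpu_sb_wg", PySem.Set.ofList [4]),
   ("gpu_sb_dev", PySem.Set.ofList [4])]

def bEmpty : PySem.Set Nat := PySem.Set.empty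

def classify_failure_root_cause_py_alt (failure : List (String × String)) : String :=
  let d := PySem.Dict.ofList failure
  let expected := d.getD "expected" ""
  let predicted := d.getD "predicted" ""
  if predicted = "ERROR" then "parse_error"
  else if predicted = "none" then "unrecognized_pattern"
  -- 'if eg & pg:' — truthiness of a frozenset = nonemptiness
  else if (PySem.Set.inter (bPatternGroups.getD expected bEmpty)
             (bPatternGroups.getD predicted bEmpty)) ≠ [] then "related_pattern_confusion"
  else "semantic_mismatch"

-- ===== PRECONDITION & SPEC =====
def Spec_classify_failure_root_cause_py (failure : List (String × String)) (out : String) : Prop := out = classify_failure_root_cause_py_alt failure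
instance (failure : List (String × String)) (out : String) : Decidable (Spec_classify_failure_root_cause_py failure out) := by unfold Spec_classify_failure_root_cause_py; infer_instance

-- ===== CLAIM (what is proved, stated in full; the proofs are below) =====
def Claim_equal_classify_failure_root_cause_py : Prop := ∀ (failure : List (String × String)), Dom_classify_failure_root_cause_py failure → Spec_classify_failure_root_cause_py failure (classify_failure_root_cause_py failure)

-- ===== LEMMAS AND PROOFS =====

-- all pattern strings = the keys of bPatternGroups
def allPats : List String :=
  ["mp", "mp_fence", "mp_addr", "mp_data", "mp_ctrl", "mp_fence_ww", "mp_fence_wr",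
   "wrc", "isa2", "sb", "sb_fence", "lb", "dekker", "iriw", "iriw_fence",
   "gpu_mp_wg", "gpu_mp_dev", "gpu_mp_scope", "gpu_sb_wg", "gpu_sb_dev"]

-- strings outside the key set get the empty index set
theorem getD_not_mem (s : String) (h : s ∉ allPats) :
    bPatternGroups.getD s bEmpty = bEmpty := by
  have hk : bPatternGroups.keys = allPats := by decide
  have h2 : bPatternGroups.get? s = none := by
    rw [PySem.Dict.get?_eq_none_iff_not_mem_keys, hk]; exact h
  rw [PySem.Dict.getD_eq_get?_getD, h2]; rfl

-- strings outside the key set are in no group of A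
theorem contains_not_mem (s : String) (h : s ∉ allPats)
    (g : String × PySem.Set String) (hg : g ∈ aRelatedGroups) :
    PySem.Set.contains g.2 s = false := by
  fin_cases hg <;>
    simp_all [allPats, PySem.Set.mem_ofList]

-- a set intersection is nonempty iff the two sets share an element
theorem inter_ne_nil (s t : PySem.Set Nat) :
    (PySem.Set.inter s t ≠ []) ↔ ∃ y, y ∈ s ∧ y ∈ t := by
  constructor
  · intro h
    obtain ⟨y, hy⟩ := List.exists_mem_of_ne_nil _ h
    exact ⟨y, (PySem.Set.mem_inter _ _ _).mp hy⟩
  · rintro ⟨y, hs, ht⟩ hnil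
    have hy : y ∈ PySem.Set.inter s t := (PySem.Set.mem_inter _ _ _).mpr ⟨hs, ht⟩
    rw [hnil] at hy; exact absurd hy (List.not_mem_nil)

-- A's loop returns "related_pattern_confusion" iff some group contains both strings
theorem aGroupLoop_eq_any (e p : String) (gs : List (String × PySem.Set String)) :
    aGroupLoop e p gs =
      if gs.any (fun g => PySem.Set.contains g.2 e && PySem.Set.contains g.2 p) then
        "related_pattern_confusion" else "semantic_mismatch" := by
  induction gs with
  | nil => rfl
  | cons g rest ih =>
    obtain ⟨n, pats⟩ := g
    simp only [aGroupLoop, List.any_cons, ih, Bool.or_eq_true]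
    by_cases h : (PySem.Set.contains pats e && PySem.Set.contains pats p) = true
    · rw [if_pos h, if_pos (Or.inl h)]
    · rw [if_neg h]
      by_cases hr : (rest.any fun g => PySem.Set.contains g.2 e && PySem.Set.contains g.2 p) = true
      · rw [if_pos hr, if_pos (Or.inr hr)]
      · rw [if_neg hr, if_neg (by tauto)]

-- core: B's intersection test agrees with A's existential over groups
theorem core (e p : String) :
    ((PySem.Set.inter (bPatternGroups.getD e bEmpty) (bPatternGroups.getD p bEmpty)) ≠ []) ↔
      (aRelatedGroups.any (fun g => PySem.Set.contains g.2 e && PySem.Set.contains g.2 p)) = true := by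
  by_cases he : e ∈ allPats
  · by_cases hp : p ∈ allPats
    · fin_cases he <;> fin_cases hp <;> decide
    · rw [getD_not_mem p hp, inter_ne_nil]
      constructor
      · rintro ⟨y, -, hy⟩; exact absurd hy (by simp [bEmpty, PySem.Set.empty])
      · intro h
        simp only [List.any_eq_true, Bool.and_eq_true] at h
        obtain ⟨g, hg, -, hcp⟩ := h
        rw [contains_not_mem p hp g hg] at hcp; exact absurd hcp (by simp)
  · rw [getD_not_mem e he, inter_ne_nil]
    constructor
    · rintro ⟨y, hy, -⟩; exact absurd hy (by simp [bEmpty, PySem.Set.empty])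
    · intro h
      simp only [List.any_eq_true, Bool.and_eq_true] at h
      obtain ⟨g, hg, hce, -⟩ := h
      rw [contains_not_mem e he g hg] at hce; exact absurd hce (by simp)

-- ===== VERDICT (by name: the statement is the Claim_ definition above) =====
theorem classify_failure_root_cause_py_spec : Claim_equal_classify_failure_root_cause_py := by
  intro failure _
  unfold Spec_classify_failure_root_cause_py classify_failure_root_cause_py classify_failure_root_cause_py_alt
  simp only [aGroupLoop_eq_any]
  split_ifs <;> first
  | rfl
  | exact absurd ((core _ _).mpr ‹_›) ‹_›
  | exact absurd ((core _ _).mp ‹_›) ‹_›
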